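-- pv_equiv track=rewrite | github.com/squallcraft/report-automation | backend/app/services/homologacion.py | _match_nombre
-- ===== SOURCE A (Python) =====
-- from typing import Optional, Dict, List, Tuple
--
-- def _match_nombre(
--     name_low_input: str,
--     entries: List[Tuple[str, int, list]],
-- ) -> Optional[int]:
--     """
--     Lógica de matching central usada por ambos flujos.
--
--     `entries`: lista de (nombre_local, id, aliases_list)
--     """
--     name_low = name_low_input.strip().lower()
--
--     # 1. Exacto
--     for nombre, eid, aliases in entries:
--         if nombre.lower() == name_low:
--             return eid
--
--     # 2. Aliases
--     for nombre, eid, aliases in entries: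
--         for alias in aliases:
--             if alias.lower() == name_low:
--                 return eid
--
--     # 3. Prefijo (nombre local ≥2 palabras es prefijo del nombre externo)
--     for nombre, eid, aliases in entries:
--         nl = nombre.lower()
--         palabras = nl.split()
--         if len(palabras) >= 2:
--             if name_low.startswith(nl + " ") or name_low == nl:
--                 return eid
--
--     # 4. Palabras-clave: TODAS las palabras del nombre local (≥2 palabras, ≥3 chars)
--     #    deben aparecer como palabras en el nombre externo.
--     #    Captura "Constanza Galaz" → "Maritza Constanza Galaz Aguilera"
--     external_words = set(name_low.split())
--     for nombre, eid, aliases in entries: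
--         nl = nombre.lower()
--         local_words = [w for w in nl.split() if len(w) >= 3]
--         if len(local_words) >= 2 and all(w in external_words for w in local_words):
--             return eid
--
--     return None
-- ===== SOURCE B (Python) =====
-- def _match_nombre(name_low_input, entries):
--     """One pass: give each entry its lowest matching priority level (1 exact,
--     2 alias, 3 prefix, 4 keywords, 5 none) and keep the first entry with the
--     smallest level."""
--     name_low = name_low_input.strip().lower()
--     external_words = set(name_low.split())
--
--     def level(nombre, aliases):
--         nl = nombre.lower()
--         if nl == name_low:
--             return 1
--         if any(a.lower() == name_low for a in aliases):
--             return 2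
--         words = nl.split()
--         if len(words) >= 2 and (name_low.startswith(nl + " ") or name_low == nl):
--             return 3
--         local = [w for w in words if len(w) >= 3]
--         if len(local) >= 2 and all(w in external_words for w in local):
--             return 4
--         return 5
--
--     best_lvl, best_id = 5, None
--     for nombre, eid, aliases in entries:
--         lv = level(nombre, aliases)
--         if lv < best_lvl:
--             best_lvl, best_id = lv, eid
--     return best_id
-- ===== Notes on version B (the rewrite author's own statement) =====
-- stated objective: alternative
-- what changed: Replaces A's four sequential full scans (exact, alias, prefix, keyword) by a single pass that scores each entry with its lowest matching priority level and keeps the first entry with the strictly smallest level.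
import Mathlib
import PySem

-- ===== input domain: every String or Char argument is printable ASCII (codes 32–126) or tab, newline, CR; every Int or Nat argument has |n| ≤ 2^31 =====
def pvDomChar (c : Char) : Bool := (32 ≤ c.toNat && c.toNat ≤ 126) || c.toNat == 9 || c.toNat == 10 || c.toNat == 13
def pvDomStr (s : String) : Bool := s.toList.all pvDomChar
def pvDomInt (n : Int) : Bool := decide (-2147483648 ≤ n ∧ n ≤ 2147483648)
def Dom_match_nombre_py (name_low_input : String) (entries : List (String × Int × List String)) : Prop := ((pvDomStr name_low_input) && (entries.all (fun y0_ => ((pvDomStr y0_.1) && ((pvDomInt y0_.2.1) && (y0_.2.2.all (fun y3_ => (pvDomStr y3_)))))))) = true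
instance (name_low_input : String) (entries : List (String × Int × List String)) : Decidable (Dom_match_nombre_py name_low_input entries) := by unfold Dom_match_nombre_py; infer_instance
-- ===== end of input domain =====

-- B replaces A's four sequential scans by ONE pass that scores each entry with its lowest
-- matching priority level and keeps the first entry with the smallest level (objective: alternative).

-- ===== PORT A =====
-- phase 1: 'for nombre, eid, aliases in entries: if nombre.lower() == name_low: return eid'
def pyA1 (name_low : List Char) : List (String × Int × List String) → Option Int
  | [] => none
  | (nombre, eid, _) :: rest =>
      if PySem.Chars.lower nombre.toList == name_low then some eid else pyA1 name_low rest

-- phase 2 inner loop: 'for alias in aliases: if alias.lower() == name_low: return eid'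
def pyA2in (name_low : List Char) : List String → Bool
  | [] => false
  | alias_ :: rest =>
      if PySem.Chars.lower alias_.toList == name_low then true else pyA2in name_low rest

def pyA2 (name_low : List Char) : List (String × Int × List String) → Option Int
  | [] => none
  | (_, eid, aliases) :: rest =>
      if pyA2in name_low aliases then some eid else pyA2 name_low rest

-- phase 3: prefix rule
def pyA3 (name_low : List Char) : List (String × Int × List String) → Option Int
  | [] => none
  | (nombre, eid, _) :: rest =>
      let nl := PySem.Chars.lower nombre.toList
      let palabras := PySem.Chars.split₀ nl
      if 2 ≤ palabras.length then
        if PySem.Chars.startswith name_low (nl ++ [' ']) || name_low == nl then some eid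
        else pyA3 name_low rest
      else pyA3 name_low rest

-- phase 4: keyword rule
def pyA4 (name_low : List Char) (external_words : PySem.Set (List Char)) :
    List (String × Int × List String) → Option Int
  | [] => none
  | (nombre, eid, _) :: rest =>
      let nl := PySem.Chars.lower nombre.toList
      let local_words := (PySem.Chars.split₀ nl).filter (fun w => 3 ≤ w.length)
      if 2 ≤ local_words.length && local_words.all (fun w => PySem.Set.contains external_words w)
      then some eid else pyA4 name_low external_words rest

def match_nombre_py (name_low_input : String) (entries : List (String × Int × List String)) : Option Int :=
  let name_low := PySem.Chars.lower (PySem.Chars.strip name_low_input.toList)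
  match pyA1 name_low entries with
  | some eid => some eid
  | none =>
    match pyA2 name_low entries with
    | some eid => some eid
    | none =>
      match pyA3 name_low entries with
      | some eid => some eid
      | none =>
        let external_words := PySem.Set.ofList (PySem.Chars.split₀ name_low)
        pyA4 name_low external_words entries

-- ===== PORT B =====
-- the lowest priority level at which an entry matches (5 = no match)
def pyBlevel (name_low : List Char) (external_words : PySem.Set (List Char))
    (nombre : String) (aliases : List String) : Nat :=
  let nl := PySem.Chars.lower nombre.toList
  if nl == name_low then 1
  else if aliases.any (fun a => PySem.Chars.lower a.toList == name_low) then 2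
  else
    let words := PySem.Chars.split₀ nl
    if 2 ≤ words.length &&
        (PySem.Chars.startswith name_low (nl ++ [' ']) || name_low == nl) then 3
    else
      let local_words := words.filter (fun w => 3 ≤ w.length)
      if 2 ≤ local_words.length && local_words.all (fun w => PySem.Set.contains external_words w)
      then 4 else 5

-- 'for …: lv = level(…); if lv < best_lvl: best_lvl, best_id = lv, eid'
def pyBloop (name_low : List Char) (external_words : PySem.Set (List Char)) :
    List (String × Int × List String) → Nat × Option Int → Nat × Option Int
  | [], best => best
  | (nombre, eid, aliases) :: rest, best =>
      let lv := pyBlevel name_low external_words nombre aliases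
      pyBloop name_low external_words rest (if lv < best.1 then (lv, some eid) else best)

def match_nombre_py_alt (name_low_input : String) (entries : List (String × Int × List String)) : Option Int :=
  let name_low := PySem.Chars.lower (PySem.Chars.strip name_low_input.toList)
  let external_words := PySem.Set.ofList (PySem.Chars.split₀ name_low)
  (pyBloop name_low external_words entries (5, none)).2

-- ===== PRECONDITION & SPEC =====
def Spec_match_nombre_py (name_low_input : String) (entries : List (String × Int × List String)) (out : Option Int) : Prop := out = match_nombre_py_alt name_low_input entries
instance (name_low_input : String) (entries : List (String × Int × List String)) (out : Option Int) : Decidable (Spec_match_nombre_py name_low_input entries out) := by unfold Spec_match_nombre_py; infer_instance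

-- ===== CLAIM (what is proved, stated in full; the proofs are below) =====
def Claim_equal_match_nombre_py : Prop := ∀ (name_low_input : String) (entries : List (String × Int × List String)), Dom_match_nombre_py name_low_input entries → Spec_match_nombre_py name_low_input entries (match_nombre_py name_low_input entries)

-- ===== LEMMAS AND PROOFS =====

-- the level of an entry, as a function of the whole tuple
def pvL (nl : List Char) (ew : PySem.Set (List Char)) (e : String × Int × List String) : Nat :=
  pyBlevel nl ew e.1 e.2.2

-- minimum level over a list (5 when empty)
def pvMin (nl : List Char) (ew : PySem.Set (List Char)) (es : List (String × Int × List String)) : Nat :=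
  es.foldr (fun e m => min (pvL nl ew e) m) 5

-- first entry attaining level m
def pvF (nl : List Char) (ew : PySem.Set (List Char)) (es : List (String × Int × List String)) (m : Nat) : Option Int :=
  (es.find? (fun e => pvL nl ew e == m)).map (fun e => e.2.1)

theorem pvL_le (nl ew e) : pvL nl ew e ≤ 5 := by
  unfold pvL pyBlevel; dsimp only; split_ifs <;> omega

theorem pvMin_cons (nl ew e es) :
    pvMin nl ew (e :: es) = min (pvL nl ew e) (pvMin nl ew es) := rfl

theorem pvMin_le5 (nl ew es) : pvMin nl ew es ≤ 5 := by
  induction es with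
  | nil => simp [pvMin]
  | cons e es ih => rw [pvMin_cons]; omega

theorem pvL_pos (nl ew e) : 1 ≤ pvL nl ew e := by
  unfold pvL pyBlevel; dsimp only; split_ifs <;> omega

theorem pvMin_pos (nl ew es) : 1 ≤ pvMin nl ew es := by
  induction es with
  | nil => simp [pvMin]
  | cons e es ih =>
      have := pvL_pos nl ew e
      rw [pvMin_cons]; omega

theorem pvMin_le (nl ew) : ∀ es e, e ∈ es → pvMin nl ew es ≤ pvL nl ew e := by
  intro es
  induction es with
  | nil => intro e h; cases h
  | cons a es ih =>
      intro e h
      rcases List.mem_cons.mp h with h | h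
      · subst h; rw [pvMin_cons]; omega
      · have := ih e h; rw [pvMin_cons]; omega

-- pyBloop computes (min level, first entry attaining it)
theorem pvLoop_eq (nl ew) : ∀ (es : List (String × Int × List String)) (b : Nat) (r : Option Int), b ≤ 5 →
    pyBloop nl ew es (b, r) =
      if pvMin nl ew es < b then (pvMin nl ew es, pvF nl ew es (pvMin nl ew es)) else (b, r) := by
  intro es
  induction es with
  | nil =>
      intro b r hb
      have : ¬ pvMin nl ew [] < b := by simp [pvMin]; omega
      simp [pyBloop, this]
  | cons e es ih =>
      intro b r hb
      obtain ⟨nombre, eid, aliases⟩ := e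
      have hpe : pvL nl ew (nombre, eid, aliases) = pyBlevel nl ew nombre aliases := rfl
      have hle : pyBlevel nl ew nombre aliases ≤ 5 := pvL_le nl ew (nombre, eid, aliases)
      rw [pvMin_cons]
      simp only [pyBloop]
      by_cases h : pyBlevel nl ew nombre aliases < b
      · rw [if_pos h, ih _ _ (by omega)]
        by_cases h2 : pvMin nl ew es < pyBlevel nl ew nombre aliases
        · have hmm : min (pvL nl ew (nombre, eid, aliases)) (pvMin nl ew es) = pvMin nl ew es := by
            omega
          rw [if_pos h2, hmm, if_pos (by omega)]
          unfold pvF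
          rw [List.find?_cons_of_neg (by simp only [beq_iff_eq]; omega)]
        · have hmm : min (pvL nl ew (nombre, eid, aliases)) (pvMin nl ew es)
              = pyBlevel nl ew nombre aliases := by omega
          rw [if_neg h2, hmm, if_pos h]
          unfold pvF
          rw [List.find?_cons_of_pos (by simp only [beq_iff_eq]; omega)]
          simp
      · rw [if_neg h, ih _ _ hb]
        by_cases h2 : pvMin nl ew es < b
        · have hmm : min (pvL nl ew (nombre, eid, aliases)) (pvMin nl ew es) = pvMin nl ew es := by
            omega
          rw [if_pos h2, hmm, if_pos h2]
          unfold pvF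
          rw [List.find?_cons_of_neg (by simp only [beq_iff_eq]; omega)]
        · have hmm : ¬ min (pvL nl ew (nombre, eid, aliases)) (pvMin nl ew es) < b := by omega
          rw [if_neg h2, if_neg hmm]

-- find? under a pointwise-equal predicate on members
theorem pvFind_congr {α : Type} (p q : α → Bool) : ∀ (es : List α),
    (∀ e ∈ es, p e = q e) → es.find? p = es.find? q := by
  intro es
  induction es with
  | nil => intro _; rfl
  | cons a es ih =>
      intro h
      have ha := h a (by simp)
      simp only [List.find?, ha]
      split
      · rfl
      · exact ih (fun e he => h e (List.mem_cons_of_mem a he))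

-- phase characterisations: each A-phase is a find? over its own predicate
theorem pyA1_eq (nl) : ∀ es, pyA1 nl es =
    (es.find? (fun e => PySem.Chars.lower e.1.toList == nl)).map (fun e => e.2.1) := by
  intro es; induction es with
  | nil => rfl
  | cons e es ih =>
      obtain ⟨n, i, a⟩ := e
      cases h : (PySem.Chars.lower n.toList == nl) <;> simp [pyA1, h, ih]

theorem pyA2_eq (nl) : ∀ es, pyA2 nl es =
    (es.find? (fun e => pyA2in nl e.2.2)).map (fun e => e.2.1) := by
  intro es; induction es with
  | nil => rfl
  | cons e es ih =>
      obtain ⟨n, i, a⟩ := e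
      cases h : pyA2in nl a <;> simp [pyA2, h, ih]

def pvP3 (nl : List Char) (e : String × Int × List String) : Bool :=
  let l := PySem.Chars.lower e.1.toList
  2 ≤ (PySem.Chars.split₀ l).length &&
    (PySem.Chars.startswith nl (l ++ [' ']) || nl == l)

theorem pyA3_eq (nl) : ∀ es, pyA3 nl es = (es.find? (pvP3 nl)).map (fun e => e.2.1) := by
  intro es; induction es with
  | nil => rfl
  | cons e es ih =>
      obtain ⟨n, i, a⟩ := e
      have hpred : pvP3 nl (n, i, a) =
          (decide (2 ≤ (PySem.Chars.split₀ (PySem.Chars.lower n.toList)).length) &&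
            (PySem.Chars.startswith nl (PySem.Chars.lower n.toList ++ [' ']) ||
              nl == PySem.Chars.lower n.toList)) := rfl
      cases h : pvP3 nl (n, i, a)
      · rw [List.find?_cons_of_neg (by simp [h]), ← ih]
        have h2 := h; rw [hpred, Bool.and_eq_false_iff] at h2
        simp only [pyA3]
        rcases h2 with h2 | h2
        · rw [if_neg (by simpa using h2)]
        · split_ifs with g1 g2 <;> simp_all
      · rw [List.find?_cons_of_pos (by simp [h])]
        have h2 := h; rw [hpred, Bool.and_eq_true] at h2
        simp only [pyA3]
        rw [if_pos (by simpa using h2.1), if_pos h2.2]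
        simp

def pvP4 (nl : List Char) (ew : PySem.Set (List Char)) (e : String × Int × List String) : Bool :=
  let lw := (PySem.Chars.split₀ (PySem.Chars.lower e.1.toList)).filter (fun w => 3 ≤ w.length)
  2 ≤ lw.length && lw.all (fun w => PySem.Set.contains ew w)

theorem pyA4_eq (nl ew) : ∀ es, pyA4 nl ew es = (es.find? (pvP4 nl ew)).map (fun e => e.2.1) := by
  intro es; induction es with
  | nil => rfl
  | cons e es ih =>
      obtain ⟨n, i, a⟩ := e
      have hpred : pvP4 nl ew (n, i, a) =
          (decide (2 ≤ ((PySem.Chars.split₀ (PySem.Chars.lower n.toList)).filter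
              (fun w => 3 ≤ w.length)).length) &&
            ((PySem.Chars.split₀ (PySem.Chars.lower n.toList)).filter (fun w => 3 ≤ w.length)).all
              (fun w => PySem.Set.contains ew w)) := rfl
      cases h : pvP4 nl ew (n, i, a)
      · rw [List.find?_cons_of_neg (by simp [h]), ← ih]
        have h2 := h; rw [hpred] at h2
        simp only [pyA4]
        rw [if_neg (by rw [h2]; simp)]
      · rw [List.find?_cons_of_pos (by simp [h])]
        have h2 := h; rw [hpred] at h2
        simp only [pyA4]
        rw [if_pos h2]
        simp

-- level ↔ phase predicates
theorem pvL_eq_one_iff (nl ew e) :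
    (pvL nl ew e == 1) = (PySem.Chars.lower e.1.toList == nl) := by
  obtain ⟨n, i, a⟩ := e
  unfold pvL pyBlevel
  dsimp only
  split_ifs with h1 h2 h3 h4 <;> simp_all

theorem pyA2in_eq_any (nl) : ∀ (as_ : List String),
    pyA2in nl as_ = as_.any (fun a => PySem.Chars.lower a.toList == nl) := by
  intro as_; induction as_ with
  | nil => rfl
  | cons a as_ ih =>
      simp only [pyA2in, List.any_cons]
      by_cases h : PySem.Chars.lower a.toList == nl <;> simp_all

theorem pvL_eq_two_iff (nl ew e) (h1 : pvL nl ew e ≠ 1) :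
    (pvL nl ew e == 2) = pyA2in nl e.2.2 := by
  obtain ⟨n, i, a⟩ := e
  rw [pyA2in_eq_any]
  unfold pvL pyBlevel at *
  dsimp only at *
  split_ifs at * with g1 g2 g3 g4 <;> simp_all

theorem pvL_eq_three_iff (nl ew e) (h1 : pvL nl ew e ≠ 1) (h2 : pvL nl ew e ≠ 2) :
    (pvL nl ew e == 3) = pvP3 nl e := by
  obtain ⟨n, i, a⟩ := e
  unfold pvL pyBlevel at *
  unfold pvP3
  dsimp only at *
  split_ifs at * with g1 g2 g3 g4 <;> simp_all

theorem pvL_eq_four_iff (nl ew e) (h1 : pvL nl ew e ≠ 1) (h2 : pvL nl ew e ≠ 2) (h3 : pvL nl ew e ≠ 3) :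
    (pvL nl ew e == 4) = pvP4 nl ew e := by
  obtain ⟨n, i, a⟩ := e
  unfold pvL pyBlevel at *
  unfold pvP4
  dsimp only at *
  split_ifs at * with g1 g2 g3 g4 <;> simp_all

theorem pvL_one_of_P1 (nl ew e) (h : (PySem.Chars.lower e.1.toList == nl) = true) : pvL nl ew e = 1 := by
  obtain ⟨n, i, a⟩ := e; unfold pvL pyBlevel; dsimp only; simp_all

theorem pvL_le_two_of_P2 (nl ew e) (h : pyA2in nl e.2.2 = true) : pvL nl ew e ≤ 2 := by
  obtain ⟨n, i, a⟩ := e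
  rw [pyA2in_eq_any] at h
  unfold pvL pyBlevel; dsimp only; split_ifs <;> simp_all
theorem pvL_le_three_of_P3 (nl ew e) (h : pvP3 nl e = true) : pvL nl ew e ≤ 3 := by
  obtain ⟨n, i, a⟩ := e
  unfold pvP3 at h
  unfold pvL pyBlevel; dsimp only; split_ifs <;> simp_all
theorem pvL_le_four_of_P4 (nl ew e) (h : pvP4 nl ew e = true) : pvL nl ew e ≤ 4 := by
  obtain ⟨n, i, a⟩ := e
  unfold pvP4 at h
  unfold pvL pyBlevel; dsimp only; split_ifs <;> simp_all

theorem pvFind_none_of_forall {α : Type} (p : α → Bool) (es : List α)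
    (h : ∀ e ∈ es, p e = false) : es.find? p = none := by
  apply List.find?_eq_none.mpr
  intro e he
  simp [h e he]

theorem pvMin_attained (nl ew es) :
    pvMin nl ew es = 5 ∨ ∃ e ∈ es, pvL nl ew e = pvMin nl ew es := by
  induction es with
  | nil => left; rfl
  | cons e es ih =>
      rw [pvMin_cons]
      have hle := pvL_le nl ew e
      rcases ih with h5 | ⟨e0, he0, hpe0⟩
      · by_cases h : pvL nl ew e ≤ pvMin nl ew es
        · right; exact ⟨e, by simp, by omega⟩
        · rw [h5]; left; omega
      · by_cases h : pvL nl ew e ≤ pvMin nl ew es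
        · right; exact ⟨e, by simp, by omega⟩
        · right
          refine ⟨e0, by simp [he0], ?_⟩
          omega

-- ===== VERDICT (by name: the statement is the Claim_ definition above) =====
theorem match_nombre_py_spec : Claim_equal_match_nombre_py := by
  intro name_low_input entries _
  unfold Spec_match_nombre_py match_nombre_py match_nombre_py_alt
  dsimp only
  set nl := PySem.Chars.lower (PySem.Chars.strip name_low_input.toList) with hnl
  set ew := PySem.Set.ofList (PySem.Chars.split₀ nl) with hew
  set m := pvMin nl ew entries with hm
  have hm5 : m ≤ 5 := pvMin_le5 nl ew entries
  have hmpos : 1 ≤ m := pvMin_pos nl ew entries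
  have hloop := pvLoop_eq nl ew entries 5 none (le_refl 5)
  rw [hloop]
  have hmemle : ∀ e ∈ entries, m ≤ pvL nl ew e := fun e he => pvMin_le nl ew entries e he
  rw [pyA1_eq, pyA2_eq, pyA3_eq, pyA4_eq]
  by_cases hm1 : m = 1
  · have hcong : entries.find? (fun e => PySem.Chars.lower e.1.toList == nl)
        = entries.find? (fun e => pvL nl ew e == m) := by
      apply pvFind_congr; intro e _
      rw [hm1, pvL_eq_one_iff]
    rw [hcong]
    have hex : (entries.find? (fun e => pvL nl ew e == m)).isSome := by
      rcases pvMin_attained nl ew entries with h5 | ⟨e0, he0, hpe0⟩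
      · omega
      · rw [List.find?_isSome]; exact ⟨e0, he0, by simp only [beq_iff_eq]; omega⟩
    obtain ⟨e0, hfind⟩ := Option.isSome_iff_exists.mp hex
    rw [if_pos (by omega), ← hm]
    simp [pvF, hfind]
  · have hno1 : ∀ e ∈ entries, (PySem.Chars.lower e.1.toList == nl) = false := by
      intro e he
      by_contra hc
      have hc' : (PySem.Chars.lower e.1.toList == nl) = true := by
        cases h : (PySem.Chars.lower e.1.toList == nl) <;> simp_all
      have := pvL_one_of_P1 nl ew e hc'
      have := hmemle e he
      omega
    rw [pvFind_none_of_forall _ _ hno1]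
    simp only [Option.map_none]
    have hL1 : ∀ e ∈ entries, pvL nl ew e ≠ 1 := by
      intro e he hc
      have : (PySem.Chars.lower e.1.toList == nl) = true := by
        rw [← pvL_eq_one_iff nl ew e, hc]; rfl
      simp [hno1 e he] at this
    by_cases hm2 : m = 2
    · have hcong : entries.find? (fun e => pyA2in nl e.2.2)
          = entries.find? (fun e => pvL nl ew e == m) := by
        apply pvFind_congr; intro e he
        rw [hm2, pvL_eq_two_iff nl ew e (hL1 e he)]
      rw [hcong]
      have hex : (entries.find? (fun e => pvL nl ew e == m)).isSome := by
        rcases pvMin_attained nl ew entries with h5 | ⟨e0, he0, hpe0⟩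
        · omega
        · rw [List.find?_isSome]; exact ⟨e0, he0, by simp only [beq_iff_eq]; omega⟩
      obtain ⟨e0, hfind⟩ := Option.isSome_iff_exists.mp hex
      rw [if_pos (by omega), ← hm]
      simp [pvF, hfind]
    · have hno2 : ∀ e ∈ entries, pyA2in nl e.2.2 = false := by
        intro e he
        by_contra hc
        have hc' : pyA2in nl e.2.2 = true := by cases h : pyA2in nl e.2.2 <;> simp_all
        have := pvL_le_two_of_P2 nl ew e hc'
        have := hmemle e he
        have := hL1 e he
        omega
      rw [pvFind_none_of_forall _ _ hno2]
      simp only [Option.map_none]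
      have hL2 : ∀ e ∈ entries, pvL nl ew e ≠ 2 := by
        intro e he hc
        have : pyA2in nl e.2.2 = true := by
          rw [← pvL_eq_two_iff nl ew e (hL1 e he), hc]; rfl
        simp [hno2 e he] at this
      by_cases hm3 : m = 3
      · have hcong : entries.find? (pvP3 nl) = entries.find? (fun e => pvL nl ew e == m) := by
          apply pvFind_congr; intro e he
          rw [hm3, pvL_eq_three_iff nl ew e (hL1 e he) (hL2 e he)]
        rw [hcong]
        have hex : (entries.find? (fun e => pvL nl ew e == m)).isSome := by
          rcases pvMin_attained nl ew entries with h5 | ⟨e0, he0, hpe0⟩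
          · omega
          · rw [List.find?_isSome]; exact ⟨e0, he0, by simp only [beq_iff_eq]; omega⟩
        obtain ⟨e0, hfind⟩ := Option.isSome_iff_exists.mp hex
        rw [if_pos (by omega), ← hm]
        simp [pvF, hfind]
      · have hno3 : ∀ e ∈ entries, pvP3 nl e = false := by
          intro e he
          by_contra hc
          have hc' : pvP3 nl e = true := by cases h : pvP3 nl e <;> simp_all
          have := pvL_le_three_of_P3 nl ew e hc'
          have := hmemle e he
          have := hL1 e he; have := hL2 e he
          omega
        rw [pvFind_none_of_forall _ _ hno3]
        simp only [Option.map_none]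
        have hL3 : ∀ e ∈ entries, pvL nl ew e ≠ 3 := by
          intro e he hc
          have : pvP3 nl e = true := by
            rw [← pvL_eq_three_iff nl ew e (hL1 e he) (hL2 e he), hc]; rfl
          simp [hno3 e he] at this
        by_cases hm4 : m = 4
        · have hcong : entries.find? (pvP4 nl ew) = entries.find? (fun e => pvL nl ew e == m) := by
            apply pvFind_congr; intro e he
            rw [hm4, pvL_eq_four_iff nl ew e (hL1 e he) (hL2 e he) (hL3 e he)]
          rw [hcong]
          have hex : (entries.find? (fun e => pvL nl ew e == m)).isSome := by
            rcases pvMin_attained nl ew entries with h5 | ⟨e0, he0, hpe0⟩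
            · omega
            · rw [List.find?_isSome]; exact ⟨e0, he0, by simp only [beq_iff_eq]; omega⟩
          obtain ⟨e0, hfind⟩ := Option.isSome_iff_exists.mp hex
          rw [if_pos (by omega), ← hm]
          simp [pvF, hfind]
        · have hm5' : m = 5 := by omega
          have hno4 : ∀ e ∈ entries, pvP4 nl ew e = false := by
            intro e he
            by_contra hc
            have hc' : pvP4 nl ew e = true := by cases h : pvP4 nl ew e <;> simp_all
            have := pvL_le_four_of_P4 nl ew e hc'
            have := hmemle e he
            have := hL1 e he; have := hL2 e he; have := hL3 e he
            omega
          rw [pvFind_none_of_forall _ _ hno4]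
          rw [if_neg (by omega)]
          simp
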